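-- pv_equiv track=rewrite | github.com/nst/StravaBook | index_creator.py | sort_index_data
-- ===== SOURCE A (Python) =====
-- def sort_index_data(index_data):
--
--     sorted_index = []
--
--     categories = ["Sommets", "Cabanes", "Courses", "Trails"]
--     regions = ["Bas Valais - Nord", "Bas Valais - Sud", "Valais Central - Nord", "Valais Central - Sud", "Haut Valais - Nord", "Haut Valais - Sud"]
--     ch = ["Berne", "Fribourg", "Jura", "Vaud", "Tessin"]
--     countries = ["France", "Italie", "Maroc", "Norvège", "Écosse", "Londres", "Tenerife"]
--
--     index_sections = categories + regions + ch + countries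
--
--     for section in index_sections:
--
--         if not section in index_data:
--             continue
--
--         pages_for_place = index_data[section]
--
--         sorted_places = sorted(pages_for_place.keys())
--
--         l = [(place, pages_for_place[place]) for place in sorted_places]
--
--         sorted_index.append((section, l))
--
--     return sorted_index
-- ===== SOURCE B (Python) =====
-- def sort_index_data(index_data):
--     sections = ["Sommets", "Cabanes", "Courses", "Trails",
--                 "Bas Valais - Nord", "Bas Valais - Sud", "Valais Central - Nord", "Valais Central - Sud", "Haut Valais - Nord", "Haut Valais - Sud",
--                 "Berne", "Fribourg", "Jura", "Vaud", "Tessin",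
--                 "France", "Italie", "Maroc", "Norvège", "Écosse", "Londres", "Tenerife"]
--     order = {s: i for i, s in enumerate(sections)}
--     present = sorted((s for s in index_data if s in order), key=order.__getitem__)
--     return [(s, [(p, index_data[s][p]) for p in sorted(index_data[s])]) for s in present]
-- ===== Notes on version B (the rewrite author's own statement) =====
-- stated objective: alternative
-- what changed: B builds a rank table for the 22 predefined sections once, filters the input dict's keys by that table and sorts the present sections by rank, instead of A's scan over the constant section list with a membership test per section.
import Mathlib
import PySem

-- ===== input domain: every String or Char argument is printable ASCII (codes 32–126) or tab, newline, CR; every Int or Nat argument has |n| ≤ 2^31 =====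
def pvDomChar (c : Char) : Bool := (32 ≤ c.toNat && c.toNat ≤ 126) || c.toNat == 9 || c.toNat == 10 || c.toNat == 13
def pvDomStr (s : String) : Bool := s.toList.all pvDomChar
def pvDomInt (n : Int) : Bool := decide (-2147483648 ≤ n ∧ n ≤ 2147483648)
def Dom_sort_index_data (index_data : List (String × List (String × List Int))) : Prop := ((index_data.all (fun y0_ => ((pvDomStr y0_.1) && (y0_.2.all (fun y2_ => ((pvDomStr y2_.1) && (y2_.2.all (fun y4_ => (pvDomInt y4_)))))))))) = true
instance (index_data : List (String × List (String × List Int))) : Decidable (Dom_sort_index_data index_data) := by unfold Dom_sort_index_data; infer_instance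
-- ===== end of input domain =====

-- B replaces A's scan over the constant section list by a rank table: it filters the dict's own
-- keys and sorts the present sections by rank (objective: alternative decomposition, same cost class).
-- dicts are association lists; both ports read them through PySem.Dict.ofList (Python dict semantics).

-- ===== PORT A =====
def sort_index_data (index_data : List (String × List (String × List Int))) : List (String × (List (String × List Int))) :=
  let categories := ["Sommets", "Cabanes", "Courses", "Trails"]
  let regions := ["Bas Valais - Nord", "Bas Valais - Sud", "Valais Central - Nord", "Valais Central - Sud", "Haut Valais - Nord", "Haut Valais - Sud"]
  let ch := ["Berne", "Fribourg", "Jura", "Vaud", "Tessin"]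
  let countries := ["France", "Italie", "Maroc", "Norvège", "Écosse", "Londres", "Tenerife"]
  let index_sections := categories ++ regions ++ ch ++ countries
  let d := PySem.Dict.ofList index_data
  index_sections.foldl (fun sorted_index sec =>
    if d.contains sec then
      -- index_data[section]: total here, guarded by the membership test above
      let pages_for_place := (d.get? sec).getD []
      let pagesd := PySem.Dict.ofList pages_for_place
      let sorted_places := PySem.List.sorted pagesd.keys (fun x => x) false
      let l := sorted_places.map (fun place => (place, (pagesd.get? place).getD []))
      sorted_index ++ [(sec, l)]
    else sorted_index) []

-- ===== PORT B =====
def sort_index_data_alt (index_data : List (String × List (String × List Int))) : List (String × (List (String × List Int))) :=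
  let sections := ["Sommets", "Cabanes", "Courses", "Trails",
    "Bas Valais - Nord", "Bas Valais - Sud", "Valais Central - Nord", "Valais Central - Sud", "Haut Valais - Nord", "Haut Valais - Sud",
    "Berne", "Fribourg", "Jura", "Vaud", "Tessin",
    "France", "Italie", "Maroc", "Norvège", "Écosse", "Londres", "Tenerife"]
  -- order = {s: i for i, s in enumerate(sections)}
  let order : PySem.Dict String Int :=
    (PySem.List.enumerate sections).foldl (fun t p => t.insert p.2 p.1) PySem.Dict.empty
  let d := PySem.Dict.ofList index_data
  -- present = sorted((s for s in index_data if s in order), key=order.__getitem__)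
  -- iterating a dict yields its distinct keys in insertion order; order[s] is total on the filtered list
  let present := PySem.List.sorted (d.keys.filter (fun s => order.contains s))
    (fun s => (order.get? s).getD 0) false
  present.map (fun s =>
    let pages := (d.get? s).getD []
    let pagesd := PySem.Dict.ofList pages
    (s, (PySem.List.sorted pagesd.keys (fun x => x) false).map
          (fun place => (place, (pagesd.get? place).getD []))))

-- ===== PRECONDITION & SPEC =====
def Spec_sort_index_data (index_data : List (String × List (String × List Int))) (out : List (String × (List (String × List Int)))) : Prop := out = sort_index_data_alt index_data
instance (index_data : List (String × List (String × List Int))) (out : List (String × (List (String × List Int)))) : Decidable (Spec_sort_index_data index_data out) := by unfold Spec_sort_index_data; infer_instance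

-- ===== CLAIM (what is proved, stated in full; the proofs are below) =====
def Claim_equal_sort_index_data : Prop := ∀ (index_data : List (String × List (String × List Int))), Dom_sort_index_data index_data → Spec_sort_index_data index_data (sort_index_data index_data)

-- ===== LEMMAS AND PROOFS =====

def pvSections : List String := ["Sommets", "Cabanes", "Courses", "Trails",
  "Bas Valais - Nord", "Bas Valais - Sud", "Valais Central - Nord", "Valais Central - Sud", "Haut Valais - Nord", "Haut Valais - Sud",
  "Berne", "Fribourg", "Jura", "Vaud", "Tessin",
  "France", "Italie", "Maroc", "Norvège", "Écosse", "Londres", "Tenerife"]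

def pvOrder : PySem.Dict String Int :=
  (PySem.List.enumerate pvSections).foldl (fun t p => t.insert p.2 p.1) PySem.Dict.empty

def pvRank (s : String) : Int := (pvOrder.get? s).getD 0

-- the per-section output both ports compute
def pvG (d : PySem.Dict String (List (String × List Int))) (s : String) : String × List (String × List Int) :=
  let pagesd := PySem.Dict.ofList ((d.get? s).getD [])
  (s, (PySem.List.sorted pagesd.keys (fun x => x) false).map
        (fun place => (place, (pagesd.get? place).getD [])))

lemma pvA_norm (d0 : List (String × List (String × List Int))) :
    sort_index_data d0 =
      (pvSections.filter (fun s => (PySem.Dict.ofList d0).contains s)).map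
        (pvG (PySem.Dict.ofList d0)) := by
  simp only [sort_index_data, pvSections]
  rw [PySem.List.foldl_append_if]
  rfl

lemma pvB_norm (d0 : List (String × List (String × List Int))) :
    sort_index_data_alt d0 =
      (PySem.List.sorted ((PySem.Dict.ofList d0).keys.filter (fun s => pvOrder.contains s))
        pvRank false).map (pvG (PySem.Dict.ofList d0)) := by
  simp only [sort_index_data_alt, pvOrder, pvSections]
  rfl

lemma pvOrder_keys : pvOrder.keys = pvSections := by decide

lemma pvSections_pairwise : pvSections.Pairwise (fun a b => pvRank a < pvRank b) := by decide

lemma pvMain (d0 : List (String × List (String × List Int))) :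
    PySem.List.sorted ((PySem.Dict.ofList d0).keys.filter (fun s => pvOrder.contains s))
        pvRank false
      = pvSections.filter (fun s => (PySem.Dict.ofList d0).contains s) := by
  apply PySem.List.sorted_eq_of_perm_of_pairwise_lt
  · rw [List.perm_ext_iff_of_nodup ((by decide : pvSections.Nodup).filter _)
        ((PySem.Dict.nodup_keys_ofList d0).filter _)]
    intro a
    simp only [List.mem_filter, PySem.Dict.contains_eq_decide_mem_keys, pvOrder_keys,
      decide_eq_true_eq]
    exact and_comm
  · exact List.Pairwise.sublist List.filter_sublist pvSections_pairwise

-- ===== VERDICT (by name: the statement is the Claim_ definition above) =====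
theorem sort_index_data_spec : Claim_equal_sort_index_data := by
  intro d0 _
  unfold Spec_sort_index_data
  rw [pvA_norm, pvB_norm, pvMain]
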